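-- pv_equiv track=rewrite | github.com/liskos/zadanie25osipov | variant_10/23.py | f
-- ===== SOURCE A (Python) =====
-- def f(x):
--     a = 0
--     if x == 3:
--         return 1
--     if x - 1 >= 3:
--         a += f(x - 1)
--     if x - 2 >= 3:
--         a += f(x - 2)
--     if (x % 3 == 0) and (x // 3 >= 3):
--         a += f(x // 3)
--     return a
-- ===== SOURCE B (Python) =====
-- def f(x):
--     if x < 3:
--         return 0
--     dp = [0, 0, 0, 1]
--     for i in range(4, x + 1):
--         dp.append(dp[i - 1] + dp[i - 2] + (dp[i // 3] if i % 3 == 0 else 0))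
--     return dp[x]
-- ===== Notes on version B (the rewrite author's own statement) =====
-- stated objective: faster
-- what changed: Replaced the exponential three-branch recursion by a bottom-up dynamic-programming table dp[0..x] filled once, reading dp[i-1], dp[i-2] and dp[i//3]; intended as asymptotically faster (a timing run saw A time out where B still returns, and B ahead wherever both finished). Pre_ excludes very large x, on which A's deep f(x-1) call chain overflows CPython's recursion limit (RecursionError) or A cannot finish.
import Mathlib
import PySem

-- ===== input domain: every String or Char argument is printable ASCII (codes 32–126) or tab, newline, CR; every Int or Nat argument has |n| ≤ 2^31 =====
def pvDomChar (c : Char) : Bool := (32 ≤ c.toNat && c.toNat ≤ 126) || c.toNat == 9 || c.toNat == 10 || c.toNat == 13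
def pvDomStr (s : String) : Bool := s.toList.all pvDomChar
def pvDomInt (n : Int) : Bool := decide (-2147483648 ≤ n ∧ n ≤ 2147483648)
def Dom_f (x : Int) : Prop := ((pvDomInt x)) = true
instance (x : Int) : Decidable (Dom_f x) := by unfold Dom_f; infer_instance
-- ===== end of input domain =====

-- B replaces A's exponential recursion by a bottom-up DP table filled once (intended as faster;
-- a timing run saw A time out where B still returns, and B ahead wherever both finished).

-- ===== PORT A =====
def f (x : Int) : Int :=
  if x = 3 then 1
  else
    (if x - 1 ≥ 3 then f (x - 1) else 0)
    + (if x - 2 ≥ 3 then f (x - 2) else 0)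
    + (if PySem.Int.mod x 3 = 0 ∧ PySem.Int.floordiv x 3 ≥ 3 then f (PySem.Int.floordiv x 3) else 0)
termination_by x.toNat
decreasing_by
  · omega
  · omega
  · rename_i hcond
    rw [PySem.Int.floordiv_eq_ediv_of_pos (by omega : (0:Int) < 3)] at hcond ⊢
    omega

-- ===== PORT B =====
-- the loop body of Source B: dp.append(dp[i-1] + dp[i-2] + (dp[i//3] if i % 3 == 0 else 0))
def step (dp : List Int) (i : Int) : List Int :=
  dp ++ [PySem.List.pyGetD dp (i - 1) 0 + PySem.List.pyGetD dp (i - 2) 0 +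
    (if PySem.Int.mod i 3 = 0 then PySem.List.pyGetD dp (PySem.Int.floordiv i 3) 0 else 0)]

def f_alt (x : Int) : Int :=
  if x < 3 then 0
  else
    let dp := (PySem.List.pyRange 4 (x + 1) 1).foldl step [0, 0, 0, 1]
    PySem.List.pyGetD dp x 0

-- ===== PRECONDITION & SPEC =====
-- Pre_ excludes only very large x: there A's depth-(x-3) call chain f(x-1) -> f(x-2) -> ...
-- overflows CPython's recursion limit and raises RecursionError (or A cannot finish), so A returns no value.
def Pre_f (x : Int) : Prop := x ≤ 996
instance (x : Int) : Decidable (Pre_f x) := by unfold Pre_f; infer_instance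
def pvWitness_f : Int := 10

def Spec_f (x : Int) (out : Int) : Prop := out = f_alt x
instance (x : Int) (out : Int) : Decidable (Spec_f x out) := by unfold Spec_f; infer_instance

-- ===== CLAIM (what is proved, stated in full; the proofs are below) =====
def Claim_equal_f : Prop := ∀ (x : Int), Dom_f x → Pre_f x → Spec_f x (f x)

-- ===== LEMMAS AND PROOFS =====

theorem f_lt3 (x : Int) (hx : x < 3) : f x = 0 := by
  rw [f]
  rw [if_neg (by omega)]
  rw [if_neg (by omega), if_neg (by omega)]
  rw [if_neg (by
    rintro ⟨-, h⟩
    rw [PySem.Int.floordiv_eq_ediv_of_pos (by omega : (0:Int) < 3)] at h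
    omega)]
  norm_num

theorem f_three : f 3 = 1 := by
  rw [f, if_pos rfl]

theorem f_rec (x : Int) (hx : 4 ≤ x) :
    f x = f (x - 1) + f (x - 2)
      + (if PySem.Int.mod x 3 = 0 then f (PySem.Int.floordiv x 3) else 0) := by
  rw [f, if_neg (by omega), if_pos (by omega)]
  congr 1
  · congr 1
    by_cases h2 : x - 2 ≥ 3
    · rw [if_pos h2]
    · rw [if_neg h2, f_lt3 _ (by omega)]
  · by_cases hm : PySem.Int.mod x 3 = 0
    · by_cases hq : PySem.Int.floordiv x 3 ≥ 3
      · rw [if_pos ⟨hm, hq⟩, if_pos hm]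
      · rw [if_neg (by rintro ⟨-, h⟩; exact hq h), if_pos hm,
          f_lt3 _ (by omega)]
    · rw [if_neg (by rintro ⟨h, -⟩; exact hm h), if_neg hm]

theorem loop_inv (n : Nat) (hn : 3 ≤ n) :
    (PySem.List.pyRange 4 ((n : Int) + 1) 1).foldl step [0, 0, 0, 1]
      = (List.range (n + 1)).map (fun j : Nat => f (j : Int)) := by
  induction n with
  | zero => omega
  | succ n ih =>
    by_cases h3 : 3 ≤ n
    · have hsplit : PySem.List.pyRange 4 (((n : Int) + 1) + 1) 1
          = PySem.List.pyRange 4 ((n : Int) + 1) 1 ++ [(n : Int) + 1] :=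
        PySem.List.pyRange_one_succ_right (by omega)
      rw [show (((n + 1 : Nat) : Int) + 1) = (((n : Int) + 1) + 1) by push_cast; ring,
        hsplit, List.foldl_append, ih h3]
      have hT : ∀ k : Nat, k < n + 1 →
          PySem.List.pyGetD ((List.range (n + 1)).map (fun j : Nat => f (j : Int))) ((k : Nat) : Int) 0
            = f (k : Int) := by
        intro k hk
        rw [PySem.List.pyGetD_natCast, PySem.List.getD_map_range _ _ _ _ hk]
      simp only [List.foldl_cons, List.foldl_nil]
      unfold step
      conv_rhs => rw [List.range_succ, List.map_append]
      congr 1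
      have e1 : (n : Int) + 1 - 1 = ((n : Nat) : Int) := by omega
      have e2 : (n : Int) + 1 - 2 = ((n - 1 : Nat) : Int) := by omega
      have emod : PySem.Int.mod ((n : Int) + 1) 3 = (((n + 1) % 3 : Nat) : Int) := by
        rw [show (n : Int) + 1 = ((n + 1 : Nat) : Int) by omega]
        exact_mod_cast PySem.Int.mod_natCast (n + 1) 3
      have ediv : PySem.Int.floordiv ((n : Int) + 1) 3 = (((n + 1) / 3 : Nat) : Int) := by
        rw [show (n : Int) + 1 = ((n + 1 : Nat) : Int) by omega]
        exact_mod_cast PySem.Int.floordiv_natCast (n + 1) 3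
      simp only [List.map_cons, List.map_nil]
      push_cast
      rw [f_rec ((n : Int) + 1) (by omega), e1, e2,
        hT n (by omega), hT (n - 1) (by omega), ediv,
        hT ((n + 1) / 3) (by omega)]
    · have hn3 : n = 2 := by omega
      subst hn3
      rw [show (((2 + 1 : Nat) : Int) + 1) = (4 : Int) by norm_num,
        PySem.List.pyRange_one_eq_nil (by norm_num)]
      simp only [List.foldl_nil]
      rw [show List.range (2 + 1 + 1) = [0, 1, 2, 3] from by decide]
      simp only [List.map_cons, List.map_nil, Nat.cast_zero, Nat.cast_one, Nat.cast_ofNat]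
      rw [f_lt3 0 (by norm_num), f_lt3 1 (by norm_num), f_lt3 2 (by norm_num), f_three]

theorem f_alt_eq (x : Int) : f x = f_alt x := by
  rw [f_alt]
  by_cases hx : x < 3
  · rw [if_pos hx, f_lt3 _ hx]
  · rw [if_neg hx]
    obtain ⟨n, rfl⟩ : ∃ n : Nat, x = (n : Int) := ⟨x.toNat, by omega⟩
    have hn : 3 ≤ n := by omega
    show f (n : Int) = PySem.List.pyGetD _ ((n : Nat) : Int) 0
    rw [loop_inv n hn, PySem.List.pyGetD_natCast,
      PySem.List.getD_map_range _ _ _ _ (Nat.lt_succ_self n)]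

-- ===== VERDICT (by name: the statement is the Claim_ definition above) =====
theorem f_spec : Claim_equal_f := by
  intro x _ _
  unfold Spec_f
  exact f_alt_eq x
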